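-- pv_equiv track=rewrite | github.com/zss1033741393-tech/OpenHarness | src/openharness/skills/loader.py | _parse_skill_markdown
-- ===== SOURCE A (Python) =====
-- def _parse_skill_markdown(default_name: str, content: str) -> tuple[str, str]:
--     """Parse name and description from a skill markdown file with YAML frontmatter support."""
--     name = default_name
--     description = ""
--
--     lines = content.splitlines()
--
--     # Try YAML frontmatter first (--- ... ---)
--     if lines and lines[0].strip() == "---":
--         for i, line in enumerate(lines[1:], 1):
--             if line.strip() == "---":
--                 # Parse frontmatter fields
--                 for fm_line in lines[1:i]:
--                     fm_stripped = fm_line.strip()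
--                     if fm_stripped.startswith("name:"):
--                         val = fm_stripped[5:].strip().strip("'\"")
--                         if val:
--                             name = val
--                     elif fm_stripped.startswith("description:"):
--                         val = fm_stripped[12:].strip().strip("'\"")
--                         if val:
--                             description = val
--                 break
--
--     # Fallback: extract from headings and first paragraph
--     if not description:
--         for line in lines:
--             stripped = line.strip()
--             if stripped.startswith("# "):
--                 if not name or name == default_name:
--                     name = stripped[2:].strip() or default_name
--                 continue
--             if stripped and not stripped.startswith("---") and not stripped.startswith("#"):
--                 description = stripped[:200]
--                 break
--
--     if not description:
--         description = f"Skill: {name}"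
--     return name, description
-- ===== SOURCE B (Python) =====
-- def _parse_skill_markdown(default_name: str, content: str) -> tuple[str, str]:
--     # Tokenize-then-interpret: classify every line ONCE into a tagged token,
--     # then both the frontmatter and the fallback phases are queries over the
--     # token stream (no re-stripping, no re-testing of prefixes).
--     toks = []
--     for line in content.splitlines():
--         s = line.strip()
--         if s == "---":
--             toks.append(("delim", "", s))
--         elif s.startswith("name:"):
--             toks.append(("name", s[5:].strip().strip("'\""), s))
--         elif s.startswith("description:"):
--             toks.append(("desc", s[12:].strip().strip("'\""), s))
--         elif s.startswith("# "):
--             toks.append(("h1", s[2:].strip(), s))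
--         elif not s or s.startswith("---") or s.startswith("#"):
--             toks.append(("skip", "", s))
--         else:
--             toks.append(("text", "", s))
--
--     name, description = default_name, ""
--
--     if toks and toks[0][0] == "delim":
--         rest = toks[1:]
--         close = next((i for i, t in enumerate(rest) if t[0] == "delim"), None)
--         if close is not None:
--             for tag, val, _ in rest[:close]:
--                 if tag == "name" and val:
--                     name = val
--                 elif tag == "desc" and val:
--                     description = val
--
--     if not description:
--         body = next((i for i, t in enumerate(toks)
--                      if t[0] in ("name", "desc", "text")), len(toks))
--         for tag, val, _ in toks[:body]:
--             if tag == "h1" and (not name or name == default_name):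
--                 name = val or default_name
--         if body < len(toks):
--             description = toks[body][2][:200]
--
--     if not description:
--         description = f"Skill: {name}"
--     return name, description
-- ===== Notes on version B (the rewrite author's own statement) =====
-- stated objective: alternative
-- what changed: B is a tokenize-then-interpret architecture: every line is classified exactly once into a tagged token (delim/name/desc/h1/skip/text plus its stripped text), and the frontmatter and fallback phases become queries over the token stream (find the closing delim token, fold the field tokens; find the first content-tagged token, fold h1 tokens before it), instead of A's three raw-line scans that re-strip and re-test string prefixes in each phase.
import Mathlib
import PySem

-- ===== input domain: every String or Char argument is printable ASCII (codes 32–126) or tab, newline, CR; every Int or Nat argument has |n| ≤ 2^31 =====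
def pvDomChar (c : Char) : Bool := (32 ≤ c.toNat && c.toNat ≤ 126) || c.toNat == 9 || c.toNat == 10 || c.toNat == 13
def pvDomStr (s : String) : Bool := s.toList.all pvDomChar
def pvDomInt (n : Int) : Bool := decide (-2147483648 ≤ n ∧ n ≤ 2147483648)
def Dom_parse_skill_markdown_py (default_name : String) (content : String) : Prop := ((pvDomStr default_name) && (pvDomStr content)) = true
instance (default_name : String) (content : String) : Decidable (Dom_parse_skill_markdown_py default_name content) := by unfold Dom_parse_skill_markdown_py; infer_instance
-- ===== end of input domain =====

-- B is a tokenize-then-interpret rewrite: each line is classified once into a tagged token and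
-- both phases become queries over the token stream; same cost, equivalence proved for all inputs.

-- ===== PORT A =====

-- fm_stripped[k:].strip().strip("'\"")
def pvAVal (s : String) (k : Int) : String :=
  PySem.Str.stripChars (PySem.Str.strip (PySem.Str.slice s (some k) none)) "'\""

-- the enumerate loop locating the first closing '---' (index i, 1-based as in A)
def pvAFindClose : List String → Nat → Option Nat
  | [], _ => none
  | l :: rest, i =>
    if PySem.Str.strip l = "---" then some i else pvAFindClose rest (i + 1)

-- 'for fm_line in lines[1:i]:' field parse over state (name, description)
def pvAFm (st : String × String) : List String → String × String
  | [] => st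
  | l :: rest =>
    let s := PySem.Str.strip l
    if PySem.Str.startswith s "name:" then
      let v := pvAVal s 5
      pvAFm (if v ≠ "" then v else st.1, st.2) rest
    else if PySem.Str.startswith s "description:" then
      let v := pvAVal s 12
      pvAFm (st.1, if v ≠ "" then v else st.2) rest
    else
      pvAFm st rest

-- the fallback 'for line in lines' loop with continue/break, carrying name
def pvAFallback (default_name : String) : List String → String → String × String
  | [], name => (name, "")
  | l :: rest, name =>
    let s := PySem.Str.strip l
    if PySem.Str.startswith s "# " then
      let name' :=
        if name = "" ∨ name = default_name then
          let v := PySem.Str.strip (PySem.Str.slice s (some 2) none)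
          if v = "" then default_name else v
        else name
      pvAFallback default_name rest name'
    else if s ≠ "" ∧ ¬ PySem.Str.startswith s "---" ∧ ¬ PySem.Str.startswith s "#" then
      (name, PySem.Str.slice s none (some 200))
    else
      pvAFallback default_name rest name

def parse_skill_markdown_py (default_name : String) (content : String) : String × String :=
  let lines := PySem.Str.splitlines content
  let st0 := (default_name, "")
  let st1 :=
    match lines with
    | [] => st0
    | l0 :: _ =>
      if PySem.Str.strip l0 = "---" then
        match pvAFindClose lines.tail 1 with
        | some i => pvAFm st0 (PySem.List.slice lines (some 1) (some (i : Int)))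
        | none => st0
      else st0
  let st2 := if st1.2 = "" then pvAFallback default_name lines st1.1 else st1
  (st2.1, if st2.2 = "" then "Skill: " ++ st2.1 else st2.2)

-- ===== PORT B =====

-- line tokens: frontmatter delimiter, name:/description: field (parsed value),
-- '# ' heading (its title), other skippable line, plain content text
inductive PvTok
  | delim
  | nm (v : String)
  | ds (v : String)
  | h1 (v : String)
  | skip
  | txt
deriving DecidableEq, Repr

def pvBVal (s : String) (k : Int) : String :=
  PySem.Str.stripChars (PySem.Str.strip (PySem.Str.slice s (some k) none)) "'\""

def pvTokOf (s : String) : PvTok :=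
  if s = "---" then .delim
  else if PySem.Str.startswith s "name:" then .nm (pvBVal s 5)
  else if PySem.Str.startswith s "description:" then .ds (pvBVal s 12)
  else if PySem.Str.startswith s "# " then .h1 (PySem.Str.strip (PySem.Str.slice s (some 2) none))
  else if s = "" ∨ PySem.Str.startswith s "---" ∨ PySem.Str.startswith s "#" then .skip
  else .txt

-- classify one line: its tag plus its stripped text
def pvClassify (line : String) : PvTok × String :=
  let s := PySem.Str.strip line
  (pvTokOf s, s)

-- index of the first delim token (none if absent)
def pvFindDelim : List (PvTok × String) → Option Nat
  | [] => none
  | (t, _) :: rest => if t = PvTok.delim then some 0 else (pvFindDelim rest).map (· + 1)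

-- frontmatter interpretation of one token
def pvFmStep (st : String × String) (tk : PvTok × String) : String × String :=
  match tk.1 with
  | .nm v => if v ≠ "" then (v, st.2) else st
  | .ds v => if v ≠ "" then (st.1, v) else st
  | _ => st

def pvIsContent (t : PvTok) : Bool :=
  match t with
  | .nm _ => true
  | .ds _ => true
  | .txt => true
  | _ => false

-- index of the first content token (length if none)
def pvBodyIdx : List (PvTok × String) → Nat
  | [] => 0
  | (t, _) :: rest => if pvIsContent t then 0 else pvBodyIdx rest + 1

-- heading interpretation of one token
def pvHeadStep (dn : String) (name : String) (tk : PvTok × String) : String :=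
  match tk.1 with
  | .h1 v => if name = "" ∨ name = dn then (if v = "" then dn else v) else name
  | _ => name

-- frontmatter phase: if the stream opens with a delim token and another delim follows,
-- fold the tokens between them
def pvFmPhase (dn : String) : List (PvTok × String) → String × String
  | (PvTok.delim, _) :: rest =>
    (match pvFindDelim rest with
     | some close => (rest.take close).foldl pvFmStep (dn, "")
     | none => (dn, ""))
  | _ => (dn, "")

def parse_skill_markdown_py_alt (default_name : String) (content : String) : String × String :=
  let toks := (PySem.Str.splitlines content).map pvClassify
  let st0 := pvFmPhase default_name toks
  let st1 :=
    if st0.2 = "" then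
      let body := pvBodyIdx toks
      ((toks.take body).foldl (pvHeadStep default_name) st0.1,
       if h : body < toks.length then PySem.Str.slice (toks[body]).2 none (some 200) else "")
    else st0
  (st1.1, if st1.2 = "" then "Skill: " ++ st1.1 else st1.2)

-- ===== PRECONDITION & SPEC =====
def Spec_parse_skill_markdown_py (default_name : String) (content : String) (out : String × String) : Prop := out = parse_skill_markdown_py_alt default_name content
instance (default_name : String) (content : String) (out : String × String) : Decidable (Spec_parse_skill_markdown_py default_name content out) := by unfold Spec_parse_skill_markdown_py; infer_instance

-- ===== CLAIM (what is proved, stated in full; the proofs are below) =====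
def Claim_equal_parse_skill_markdown_py : Prop := ∀ (default_name : String) (content : String), Dom_parse_skill_markdown_py default_name content → Spec_parse_skill_markdown_py default_name content (parse_skill_markdown_py default_name content)

-- ===== LEMMAS AND PROOFS =====

lemma pvVal_eq : pvBVal = pvAVal := rfl

-- if p = c :: tl is a prefix of s, s starts with c
lemma pvSw_head (s p : String) (c : Char) (tl : List Char) (hp : p.toList = c :: tl)
    (h : PySem.Str.startswith s p = true) : s.toList.head? = some c := by
  rw [PySem.Str.startswith_eq, PySem.Chars.startswith_iff] at h
  obtain ⟨t, ht⟩ := h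
  rw [← ht, hp]
  rfl

lemma pvDelim_iff (s : String) : pvTokOf s = PvTok.delim ↔ s = "---" := by
  unfold pvTokOf
  split_ifs with h1 h2 h3 h4 h5 <;> simp_all

lemma pvContent_iff (s : String) :
    pvIsContent (pvTokOf s) = true ↔
      (s ≠ "" ∧ ¬ PySem.Str.startswith s "---" ∧ ¬ PySem.Str.startswith s "#") := by
  unfold pvTokOf
  split_ifs with h1 h2 h3 h4 h5
  · subst h1
    simp only [pvIsContent, Bool.false_eq_true, false_iff]
    rintro ⟨-, hb, -⟩
    exact hb (by decide)
  · simp only [pvIsContent, true_iff]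
    have hh := pvSw_head s "name:" 'n' "ame:".toList rfl h2
    refine ⟨?_, ?_, ?_⟩
    · intro he; subst he; simp at hh
    · intro hc
      have := pvSw_head s "---" '-' "--".toList rfl hc
      rw [hh] at this; simp at this
    · intro hc
      have := pvSw_head s "#" '#' [] rfl hc
      rw [hh] at this; simp at this
  · simp only [pvIsContent, true_iff]
    have hh := pvSw_head s "description:" 'd' "escription:".toList rfl h3
    refine ⟨?_, ?_, ?_⟩
    · intro he; subst he; simp at hh
    · intro hc
      have := pvSw_head s "---" '-' "--".toList rfl hc
      rw [hh] at this; simp at this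
    · intro hc
      have := pvSw_head s "#" '#' [] rfl hc
      rw [hh] at this; simp at this
  · simp only [pvIsContent, Bool.false_eq_true, false_iff]
    rintro ⟨-, -, hsharp⟩
    apply hsharp
    rw [PySem.Str.startswith_eq, PySem.Chars.startswith_iff]
    rw [PySem.Str.startswith_eq, PySem.Chars.startswith_iff] at h4
    exact List.IsPrefix.trans (by decide) h4
  · simp only [pvIsContent, Bool.false_eq_true, false_iff]
    rintro ⟨ha, hb, hc⟩
    rcases h5 with h | h | h
    · exact ha h
    · exact hb h
    · exact hc h
  · simp only [pvIsContent, true_iff]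
    push_neg at h5
    exact ⟨h5.1, h5.2.1, h5.2.2⟩

-- one frontmatter step equals A's conditional update
lemma pvFmStep_eq (st : String × String) (s : String) :
    pvFmStep st (pvTokOf s, s) =
      if PySem.Str.startswith s "name:" then
        (if pvAVal s 5 ≠ "" then pvAVal s 5 else st.1, st.2)
      else if PySem.Str.startswith s "description:" then
        (st.1, if pvAVal s 12 ≠ "" then pvAVal s 12 else st.2)
      else st := by
  by_cases h1 : s = "---"
  · subst h1
    have e1 : pvTokOf "---" = PvTok.delim := by decide
    rw [e1]
    show st = _
    rw [if_neg (by decide : ¬ PySem.Str.startswith "---" "name:" = true),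
        if_neg (by decide : ¬ PySem.Str.startswith "---" "description:" = true)]
  · by_cases h2 : PySem.Str.startswith s "name:" = true
    · have e : pvTokOf s = PvTok.nm (pvBVal s 5) := by
        unfold pvTokOf
        rw [if_neg h1, if_pos h2]
      rw [e]
      simp only [pvFmStep, pvVal_eq, h2, if_true]
      by_cases hv : pvAVal s 5 = "" <;> simp [hv]
    · by_cases h3 : PySem.Str.startswith s "description:" = true
      · have e : pvTokOf s = PvTok.ds (pvBVal s 12) := by
          unfold pvTokOf
          rw [if_neg h1, if_neg h2, if_pos h3]
        rw [e]
        simp only [pvFmStep, pvVal_eq, h2, h3, if_true, Bool.false_eq_true, if_false]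
        by_cases hv : pvAVal s 12 = "" <;> simp [hv]
      · have e : pvFmStep st (pvTokOf s, s) = st := by
          unfold pvTokOf
          rw [if_neg h1, if_neg h2, if_neg h3]
          split_ifs <;> rfl
        rw [e, if_neg h2, if_neg h3]

lemma pvH1_sw (s v : String) (h : pvTokOf s = PvTok.h1 v) :
    PySem.Str.startswith s "# " = true := by
  unfold pvTokOf at h
  split_ifs at h <;> simp_all

-- one heading step equals A's conditional update
lemma pvHeadStep_eq (dn name s : String) :
    pvHeadStep dn name (pvTokOf s, s) =
      if PySem.Str.startswith s "# " then
        (if name = "" ∨ name = dn then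
           (if PySem.Str.strip (PySem.Str.slice s (some 2) none) = "" then dn
            else PySem.Str.strip (PySem.Str.slice s (some 2) none))
         else name)
      else name := by
  by_cases h4 : PySem.Str.startswith s "# " = true
  · have hhd := pvSw_head s "# " '#' [' '] rfl h4
    have e : pvTokOf s = PvTok.h1 (PySem.Str.strip (PySem.Str.slice s (some 2) none)) := by
      unfold pvTokOf
      have h1 : ¬ s = "---" := by
        intro he; subst he; exact absurd h4 (by decide)
      have h2 : ¬ PySem.Str.startswith s "name:" = true := by
        intro hc
        have := pvSw_head s "name:" 'n' "ame:".toList rfl hc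
        rw [hhd] at this; simp at this
      have h3 : ¬ PySem.Str.startswith s "description:" = true := by
        intro hc
        have := pvSw_head s "description:" 'd' "escription:".toList rfl hc
        rw [hhd] at this; simp at this
      rw [if_neg h1, if_neg h2, if_neg h3, if_pos h4]
    rw [e]
    simp only [pvHeadStep, h4, if_true]
  · have e : pvHeadStep dn name (pvTokOf s, s) = name := by
      cases htok : pvTokOf s
      case h1 v => exact absurd (pvH1_sw s v htok) h4
      all_goals rfl
    rw [e, if_neg h4]

-- A's fm loop is B's fold over the classified tokens
lemma pvFm_fold : ∀ (ls : List String) (st : String × String),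
    pvAFm st ls = (ls.map pvClassify).foldl pvFmStep st := by
  intro ls
  induction ls with
  | nil => intro st; rfl
  | cons l rest ih =>
    intro st
    rw [List.map_cons, List.foldl_cons]
    have hcl : pvClassify l = (pvTokOf (PySem.Str.strip l), PySem.Str.strip l) := rfl
    rw [hcl, pvFmStep_eq]
    simp only [pvAFm]
    split_ifs <;> exact ih _

-- A's enumerate search for the closing '---' is B's delim-token search
lemma pvFind_eq : ∀ (ls : List String) (i : Nat),
    pvAFindClose ls i = (pvFindDelim (ls.map pvClassify)).map (· + i) := by
  intro ls
  induction ls with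
  | nil => intro i; rfl
  | cons l rest ih =>
    intro i
    by_cases hc : PySem.Str.strip l = "---"
    · have hd : pvTokOf "---" = PvTok.delim := by decide
      simp [pvAFindClose, hc, pvFindDelim, pvClassify, hd]
    · have ht : pvTokOf (PySem.Str.strip l) ≠ PvTok.delim := fun h => hc ((pvDelim_iff _).mp h)
      simp only [pvAFindClose, if_neg hc, List.map_cons, pvClassify, pvFindDelim, if_neg ht, ih]
      cases pvFindDelim (rest.map pvClassify) <;> simp <;> omega

-- A's fallback loop is B's body-index + heading fold over the classified tokens
lemma pvFallback_eq (dn : String) : ∀ (ls : List String) (name : String),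
    pvAFallback dn ls name =
      (((ls.map pvClassify).take (pvBodyIdx (ls.map pvClassify))).foldl (pvHeadStep dn) name,
       if h : pvBodyIdx (ls.map pvClassify) < (ls.map pvClassify).length
       then PySem.Str.slice ((ls.map pvClassify)[pvBodyIdx (ls.map pvClassify)]).2 none (some 200)
       else "") := by
  intro ls
  induction ls with
  | nil => intro name; simp [pvAFallback, pvBodyIdx]
  | cons l rest ih =>
    intro name
    have hcl : pvClassify l = (pvTokOf (PySem.Str.strip l), PySem.Str.strip l) := rfl
    by_cases hh : PySem.Str.startswith (PySem.Str.strip l) "# " = true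
    · have hcont : pvIsContent (pvTokOf (PySem.Str.strip l)) = false := by
        rw [← Bool.not_eq_true, pvContent_iff]
        rintro ⟨-, -, hsharp⟩
        apply hsharp
        rw [PySem.Str.startswith_eq, PySem.Chars.startswith_iff]
        rw [PySem.Str.startswith_eq, PySem.Chars.startswith_iff] at hh
        exact List.IsPrefix.trans (by decide) hh
      have hhead : pvHeadStep dn name (pvTokOf (PySem.Str.strip l), PySem.Str.strip l)
          = (if name = "" ∨ name = dn then
               (if PySem.Str.strip (PySem.Str.slice (PySem.Str.strip l) (some 2) none) = "" then dn
                else PySem.Str.strip (PySem.Str.slice (PySem.Str.strip l) (some 2) none))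
             else name) := by
        rw [pvHeadStep_eq]
        simp only [hh, if_true]
      rw [pvAFallback, if_pos hh, ih]
      simp only [List.map_cons, hcl, pvBodyIdx, hcont, Bool.false_eq_true, if_false,
        List.take_succ_cons, List.foldl_cons, hhead, List.length_cons, Nat.add_lt_add_iff_right]
      refine congrArg _ ?_
      by_cases hp : pvBodyIdx (rest.map pvClassify) < (rest.map pvClassify).length
      · rw [dif_pos hp, dif_pos hp, List.getElem_cons_succ]
      · rw [dif_neg hp, dif_neg hp]
    · by_cases hcond : PySem.Str.strip l ≠ "" ∧ ¬ PySem.Str.startswith (PySem.Str.strip l) "---" ∧ ¬ PySem.Str.startswith (PySem.Str.strip l) "#"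
      · have hcont : pvIsContent (pvTokOf (PySem.Str.strip l)) = true := (pvContent_iff _).mpr hcond
        rw [pvAFallback, if_neg hh, if_pos hcond]
        simp only [List.map_cons, hcl, pvBodyIdx, hcont, if_true, List.take_zero,
          List.foldl_nil, List.length_cons]
        refine congrArg _ ?_
        rw [dif_pos (by omega), List.getElem_cons_zero]
      · have hcont : pvIsContent (pvTokOf (PySem.Str.strip l)) = false := by
          rw [← Bool.not_eq_true, pvContent_iff]
          exact hcond
        have hhead : pvHeadStep dn name (pvTokOf (PySem.Str.strip l), PySem.Str.strip l) = name := by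
          rw [pvHeadStep_eq, if_neg hh]
        rw [pvAFallback, if_neg hh, if_neg hcond, ih]
        simp only [List.map_cons, hcl, pvBodyIdx, hcont, Bool.false_eq_true, if_false,
          List.take_succ_cons, List.foldl_cons, hhead, List.length_cons, Nat.add_lt_add_iff_right]
        refine congrArg _ ?_
        by_cases hp : pvBodyIdx (rest.map pvClassify) < (rest.map pvClassify).length
        · rw [dif_pos hp, dif_pos hp, List.getElem_cons_succ]
        · rw [dif_neg hp, dif_neg hp]

-- the shared finishing phase (fallback + 'Skill:' default)
lemma pvTail (dn : String) (ls : List String) (st : String × String) :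
    (let st2 := if st.2 = "" then pvAFallback dn ls st.1 else st;
     (st2.1, if st2.2 = "" then "Skill: " ++ st2.1 else st2.2))
    = (let toks := ls.map pvClassify;
       let st1 :=
         if st.2 = "" then
           ((toks.take (pvBodyIdx toks)).foldl (pvHeadStep dn) st.1,
            if h : pvBodyIdx toks < toks.length
            then PySem.Str.slice (toks[pvBodyIdx toks]).2 none (some 200) else "")
         else st;
       (st1.1, if st1.2 = "" then "Skill: " ++ st1.1 else st1.2)) := by
  by_cases hd : st.2 = "" <;> simp only [hd, if_true, if_false, pvFallback_eq]

set_option maxHeartbeats 1000000 in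
lemma pv_main (dn content : String) :
    parse_skill_markdown_py dn content = parse_skill_markdown_py_alt dn content := by
  unfold parse_skill_markdown_py parse_skill_markdown_py_alt
  rcases hls : PySem.Str.splitlines content with _ | ⟨l0, rest⟩
  · exact pvTail dn [] (dn, "")
  · have hcl : pvClassify l0 = (pvTokOf (PySem.Str.strip l0), PySem.Str.strip l0) := rfl
    by_cases h0 : PySem.Str.strip l0 = "---"
    · have hdel : pvTokOf (PySem.Str.strip l0) = PvTok.delim := (pvDelim_iff _).mpr h0
      simp only [List.map_cons, hcl, hdel, if_pos h0, List.tail_cons, pvFind_eq rest 1, pvFmPhase]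
      cases hF : pvFindDelim (rest.map pvClassify) with
      | none =>
        refine Eq.trans (pvTail dn (l0 :: rest) (dn, "")) ?_
        simp only [List.map_cons, hcl, hdel]
      | some close =>
        simp only [Option.map_some]
        have hsl : PySem.List.slice (l0 :: rest) (some (1 : Int)) (some ((close + 1 : Nat) : Int))
            = rest.take close := by
          rw [show (1 : Int) = ((1 : Nat) : Int) from rfl, PySem.List.slice_natCast]
          simp
        have hfm : pvAFm (dn, "") (PySem.List.slice (l0 :: rest) (some (1 : Int)) (some ((close + 1 : Nat) : Int)))
            = ((rest.map pvClassify).take close).foldl pvFmStep (dn, "") := by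
          rw [hsl, pvFm_fold, List.map_take]
        refine Eq.trans ?_ (Eq.trans (pvTail dn (l0 :: rest)
          (pvAFm (dn, "") (PySem.List.slice (l0 :: rest) (some (1 : Int)) (some ((close + 1 : Nat) : Int))))) ?_)
        · rfl
        · rw [hfm]
          simp only [List.map_cons, hcl, hdel]
    · have hnd : pvTokOf (PySem.Str.strip l0) ≠ PvTok.delim := fun h => h0 ((pvDelim_iff _).mp h)
      have hB : pvFmPhase dn ((pvTokOf (PySem.Str.strip l0), PySem.Str.strip l0) :: rest.map pvClassify)
          = (dn, "") := by
        cases htok : pvTokOf (PySem.Str.strip l0)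
        case delim => exact absurd htok hnd
        all_goals rfl
      simp only [List.map_cons, hcl, if_neg h0, hB]
      exact pvTail dn (l0 :: rest) (dn, "")

-- ===== VERDICT (by name: the statement is the Claim_ definition above) =====
theorem parse_skill_markdown_py_spec : Claim_equal_parse_skill_markdown_py := by
  intro default_name content _
  unfold Spec_parse_skill_markdown_py
  exact pv_main default_name content
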